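-- pv_equiv track=rewrite | github.com/imbeom35/Algorithm | 프로그래머스/4/72416. 매출 하락 최소화/매출 하락 최소화.py | solution
-- ===== SOURCE A (Python) =====
-- def solution(sales, links):
--     sales = [0] + sales
--     tree = [[] for _ in range(len(sales) + 1)]
--     for a, b in links:
--         tree[a].append(b)
--     dp = [[0, 0] for _ in range(len(sales) + 1)]
--     dfs(1, dp, tree, sales)
--
--     return min(dp[1])
--
-- def dfs(node, dp, tree, sales):
--     # 리프노드일 경우, 해당 노드의 비용만 계산
--     if not tree[node]:
--         dp[node][0] = sales[node]
--         dp[node][1] = 0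
--         return
--
--     dp[node][0] = sales[node]
--     min_gap = float('inf')
--
--     for i in tree[node]:
--         dfs(i, dp, tree, sales)
--         # 부모노드가 참석할 때 비용은 모든 자식노드의 최소 비용의 합
--         dp[node][0] += min(dp[i])
--         min_gap = min(min_gap, dp[i][0] - dp[i][1])
--         if min_gap < 0: min_gap = 0
--
--     # 부모노드가 참석하지 않을 때 비용은
--     # 참석할 때 비용에서 부모노드의 비용을 빼고
--     # 추가로 모든 자식노드 중에서 하나를 참석할 때 비용이 가장 적은 값으로 치환한 값
--     dp[node][1] = dp[node][0] + min_gap - sales[node]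
-- ===== SOURCE B (Python) =====
-- def solution(sales, links):
--     # Fixpoint iteration (Jacobi-style): no recursion; repeat n synchronous
--     # rounds, each recomputing every node's (attend, absent) pair from the
--     # previous round's table; values stabilize bottom-up by subtree height.
--     n = len(sales)
--     s = [0] + sales
--     children = [[] for _ in range(n + 1)]
--     for a, b in links:
--         children[a].append(b)
--     dp = [(0, 0)] * (n + 1)
--     for _ in range(n):
--         dp = [_pv_step(v, children[v], s, dp) for v in range(n + 1)]
--     return min(dp[1])
--
-- def _pv_step(v, ch, s, dp):
--     if not ch:
--         return (s[v], 0)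
--     attend = s[v] + sum(min(dp[c]) for c in ch)
--     gap = max(0, min(dp[c][0] - dp[c][1] for c in ch))
--     return (attend, attend + gap - s[v])
-- ===== Notes on version B (the rewrite author's own statement) =====
-- stated objective: alternative
-- what changed: replaces the mutating recursive DFS with a recursion-free synchronous fixpoint iteration: n rounds, each rebuilding the whole (attend, absent) table from the previous round's table, with the per-node clamp written as max(0, min of child gaps); values stabilize bottom-up by subtree height
-- outside the precondition, e.g. on solution([5, 1], [[-2, 2]]): A returns 0, B returns 1; on solution([5, 1, 2], [[1, 2], [1, 2]]): A returns 1, B returns 1; on solution([1, 1, 1], [[3, -1000000]]): A returns 0, B raises IndexError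
import Mathlib
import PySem

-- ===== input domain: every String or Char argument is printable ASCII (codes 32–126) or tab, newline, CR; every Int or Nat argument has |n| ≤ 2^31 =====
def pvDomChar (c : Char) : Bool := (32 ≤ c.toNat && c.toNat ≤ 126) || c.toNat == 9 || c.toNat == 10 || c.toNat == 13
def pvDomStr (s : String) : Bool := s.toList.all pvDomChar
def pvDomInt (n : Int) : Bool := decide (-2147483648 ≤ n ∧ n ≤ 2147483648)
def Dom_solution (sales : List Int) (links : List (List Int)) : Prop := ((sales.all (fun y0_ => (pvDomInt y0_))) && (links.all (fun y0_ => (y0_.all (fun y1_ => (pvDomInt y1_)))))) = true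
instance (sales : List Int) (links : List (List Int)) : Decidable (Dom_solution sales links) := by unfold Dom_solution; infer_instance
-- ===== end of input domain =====

-- B replaces A's mutating recursive DFS by a recursion-free synchronous fixpoint iteration
-- (n rounds, each rebuilding the whole table from the previous round's table): alternative decomposition.


-- ===== PORT A =====
-- tree[a].append(b): exact via pyGet?/pySet?; an out-of-range index (IndexError in
-- Python) leaves the list unchanged (outside Pre_).
def pvAppendAt (t : List (List Int)) (a b : Int) : List (List Int) :=
  match PySem.List.pyGet? t a with
  | some row => (PySem.List.pySet? t a (row ++ [b])).getD t
  | none => t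

-- 'for a, b in links: tree[a].append(b)'; a row that is not a two-element list raises
-- ValueError in Python (outside Pre_), ported as leaving the table unchanged.
def pvBuildTree (m : Nat) (links : List (List Int)) : List (List Int) :=
  links.foldl (fun t l =>
    match l with
    | [a, b] => pvAppendAt t a b
    | _ => t) ((List.range m).map (fun _ => ([] : List Int)))

-- A's dfs: the dp list is threaded through and mutated in place (pySetD); fuel only
-- guards totality (on Pre_ inputs the recursion depth is below the fuel supplied by
-- 'solution', since the nodes on any root path are distinct).
def pvDfsA (tree : List (List Int)) (s : List Int) :
    Nat → Int → List (Int × Int) → List (Int × Int)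
  | 0, _, dp => dp
  | fuel+1, node, dp =>
    let ch := PySem.List.pyGetD tree node []
    if ch = [] then
      let sv := PySem.List.pyGetD s node 0
      PySem.List.pySetD dp node (sv, 0)
    else
      let sv := PySem.List.pyGetD s node 0
      let dp1 := PySem.List.pySetD dp node (sv, (PySem.List.pyGetD dp node (0, 0)).2)
      let st := ch.foldl (fun (st : List (Int × Int) × Option Int) i =>
          let dp2 := pvDfsA tree s fuel i st.1
          let di := PySem.List.pyGetD dp2 i (0, 0)
          let cur := PySem.List.pyGetD dp2 node (0, 0)
          let dp3 := PySem.List.pySetD dp2 node (cur.1 + min di.1 di.2, cur.2)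
          let mg := match st.2 with
            | none => di.1 - di.2
            | some m => min m (di.1 - di.2)
          (dp3, some (if mg < 0 then 0 else mg))) (dp1, none)
      let cur := PySem.List.pyGetD st.1 node (0, 0)
      PySem.List.pySetD st.1 node (cur.1, cur.1 + st.2.getD 0 - sv)

def solution (sales : List Int) (links : List (List Int)) : Int :=
  let s := 0 :: sales
  let tree := pvBuildTree (s.length + 1) links
  let dp0 := (List.range (s.length + 1)).map (fun _ => ((0 : Int), (0 : Int)))
  let dp := pvDfsA tree s (s.length + 1) 1 dp0
  let p := PySem.List.pyGetD dp 1 (0, 0)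
  min p.1 p.2

-- ===== PORT B =====
-- one entry of B's synchronous round: _pv_step(v, ch, s, dp)
def pvStepBv (ch : List Int) (s : List Int) (dp : List (Int × Int)) (v : Int) : Int × Int :=
  match ch with
  | [] => (PySem.List.pyGetD s v 0, 0)
  | c :: cs =>
    let sv := PySem.List.pyGetD s v 0
    let attend := sv + ((c :: cs).map (fun j =>
        let d := PySem.List.pyGetD dp j (0, 0); min d.1 d.2)).sum
    let gapOf := fun (j : Int) =>
        (PySem.List.pyGetD dp j (0, 0)).1 - (PySem.List.pyGetD dp j (0, 0)).2
    let gap := max 0 (cs.foldl (fun m j => min m (gapOf j)) (gapOf c))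
    (attend, attend + gap - sv)

def solution_alt (sales : List Int) (links : List (List Int)) : Int :=
  let n := sales.length
  let s := (0 : Int) :: sales
  let children := pvBuildTree (n + 1) links
  let dp0 := List.replicate (n + 1) ((0 : Int), (0 : Int))
  let dp := (List.range n).foldl
    (fun dp _ => (PySem.List.pyRange 0 ((n : Int) + 1) 1).map
      (fun v => pvStepBv (PySem.List.pyGetD children v []) s dp v)) dp0
  let p := PySem.List.pyGetD dp 1 (0, 0)
  min p.1 p.2

-- ===== PRECONDITION & SPEC =====
-- the problem's natural tree shape: in-range 1-based endpoints, each node at most one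
-- parent, the root 1 none
def PreTree (sales : List Int) (links : List (List Int)) : Prop :=
  sales ≠ [] ∧
  (∀ l ∈ links, l.length = 2 ∧ 1 ≤ l.getD 0 0 ∧ l.getD 0 0 ≤ (sales.length : Int) ∧
    2 ≤ l.getD 1 0 ∧ l.getD 1 0 ≤ (sales.length : Int)) ∧
  (links.map (fun l => l.getD 1 0)).Nodup

-- degenerate inputs where node 1 gets no children in either program's table (both then
-- treat node 1 as a leaf): rows are pairs of indices both programs' tables accept, and
-- the first entry wraps to row 1 in neither table
def PreLeaf (sales : List Int) (links : List (List Int)) : Prop :=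
  sales ≠ [] ∧
  (∀ l ∈ links, l.length = 2 ∧
    -((sales.length : Int) + 1) ≤ l.getD 0 0 ∧ l.getD 0 0 ≤ (sales.length : Int) ∧
    (if l.getD 0 0 < 0 then l.getD 0 0 + (sales.length : Int) + 2 else l.getD 0 0) ≠ 1 ∧
    (if l.getD 0 0 < 0 then l.getD 0 0 + (sales.length : Int) + 1 else l.getD 0 0) ≠ 1 ∧
    -((sales.length : Int) + 1) ≤ l.getD 1 0 ∧ l.getD 1 0 ≤ (sales.length : Int))

-- Pre_ excludes the inputs on which A raises (IndexError on empty sales or out-of-range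
-- endpoints, ValueError on rows that are not pairs, RecursionError on cyclic links) by
-- admitting the problem's natural tree shape (PreTree) plus the degenerate inputs where
-- node 1 is a leaf in both programs (PreLeaf); negative indices that wrap to row 1 in
-- only one of the two differently-sized tables and repeated-child lists, on which A may
-- still return, lie outside (see cites).
def Pre_solution (sales : List Int) (links : List (List Int)) : Prop :=
  PreTree sales links ∨ PreLeaf sales links
instance (sales : List Int) (links : List (List Int)) : Decidable (Pre_solution sales links) := by
  unfold Pre_solution PreTree PreLeaf; infer_instance

def pvWitness_solution : List Int × List (List Int) := ([5, 10, 20], [[1, 3], [3, 2]])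

def Spec_solution (sales : List Int) (links : List (List Int)) (out : Int) : Prop :=
  out = solution_alt sales links
instance (sales : List Int) (links : List (List Int)) (out : Int) :
    Decidable (Spec_solution sales links out) := by unfold Spec_solution; infer_instance

-- ===== CLAIM =====
def Claim_equal_solution : Prop := ∀ (sales : List Int) (links : List (List Int)),
  Dom_solution sales links → Pre_solution sales links →
  Spec_solution sales links (solution sales links)

-- ===== LEMMAS AND PROOFS =====

-- the children list of a node, read straight off the links list
def childrenOf (links : List (List Int)) (v : Int) : List Int :=
  (links.filter (fun l => l.getD 0 0 == v)).map (fun l => l.getD 1 0)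

-- the edge relation of the links list
def pvE (links : List (List Int)) (a b : Int) : Prop := b ∈ childrenOf links a

-- the per-node (attend, absent) value both programs compute, fuel-indexed
def pvF (links : List (List Int)) (s : List Int) : Nat → Int → Int × Int
  | 0, _ => (0, 0)
  | f+1, v =>
    match childrenOf links v with
    | [] => (PySem.List.pyGetD s v 0, 0)
    | c :: cs =>
      let sv := PySem.List.pyGetD s v 0
      let attend := sv + ((c :: cs).map (fun j =>
          min (pvF links s f j).1 (pvF links s f j).2)).sum
      let gap := max 0 (cs.foldl
          (fun m j => min m ((pvF links s f j).1 - (pvF links s f j).2))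
          ((pvF links s f c).1 - (pvF links s f c).2))
      (attend, attend + gap - sv)

-- "subtree height of v is < k"
def pvLow (links : List (List Int)) : Nat → Int → Prop
  | 0, _ => False
  | k+1, v => ∀ c ∈ childrenOf links v, pvLow links k c

theorem pvList_len2 (l : List Int) (h : l.length = 2) : ∃ a b, l = [a, b] := by
  match l with
  | [a, b] => exact ⟨a, b, rfl⟩
  | [] => simp at h
  | [a] => simp at h
  | a :: b :: c :: r => simp at h

theorem childrenOf_cons (a b : Int) (rest : List (List Int)) (j : Int) :
    childrenOf ([a, b] :: rest) j
      = if a = j then b :: childrenOf rest j else childrenOf rest j := by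
  simp only [childrenOf, List.filter_cons]
  by_cases h : a = j
  · simp [h]
  · simp [h]

theorem pyGetD_nonneg {α : Type} (xs : List α) (i : Int) (d : α) (h : 0 ≤ i) :
    PySem.List.pyGetD xs i d = xs.getD i.toNat d := by
  have hi : i = ((i.toNat : Nat) : Int) := by omega
  rw [hi, PySem.List.pyGetD_natCast]
  simp only [List.getD_eq_getElem?_getD]
  have hm : ((i.toNat : Int)).toNat = i.toNat := by omega
  rw [hm]

theorem pvAppendAt_eq (t : List (List Int)) (a b : Int)
    (h0 : 0 ≤ a) (h1 : a.toNat < t.length) :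
    pvAppendAt t a b = t.set a.toNat (t.getD a.toNat [] ++ [b]) := by
  unfold pvAppendAt
  have hg : PySem.List.pyGet? t a = some (t[a.toNat]) := by
    rw [PySem.List.pyGet?_of_nonneg (h := h0), List.getElem?_eq_getElem h1]
  rw [hg]
  dsimp only
  have hs := PySem.List.pySetD_of_nonneg (xs := t) (v := t[a.toNat] ++ [b]) h0
  unfold PySem.List.pySetD at hs
  rw [hs]
  simp [List.getD_eq_getElem?_getD, List.getElem?_eq_getElem h1]

-- Python's index into a list of length m (negative indices count from the end)
def pvWrapIdx (a : Int) (m : Nat) : Int := if a < 0 then a + m else a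

-- pvAppendAt at any in-range Python index, including the negative wraparound
theorem pvAppendAt_eq' (t : List (List Int)) (a b : Int)
    (h1 : -(t.length : Int) ≤ a) (h2 : a < (t.length : Int)) :
    pvAppendAt t a b = t.set (pvWrapIdx a t.length).toNat
      (t.getD (pvWrapIdx a t.length).toNat [] ++ [b]) := by
  rcases lt_or_ge a 0 with h0 | h0
  case inr =>
    have hw : pvWrapIdx a t.length = a := if_neg (by omega)
    rw [hw]
    exact pvAppendAt_eq t a b h0 (by omega)
  case inl =>
    have hw : (pvWrapIdx a t.length).toNat = t.length - (-a).toNat := by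
      unfold pvWrapIdx; rw [if_pos h0]; omega
    have hilt : t.length - (-a).toNat < t.length := by omega
    have hget : PySem.List.pyGet? t a = some (t[t.length - (-a).toNat]) := by
      simp only [PySem.List.pyGet?, PySem.List.pyIdx?]
      rw [if_neg (by omega), if_pos h1]
      simp [List.getElem?_eq_getElem hilt]
    have hset : PySem.List.pySet? t a (t[t.length - (-a).toNat] ++ [b])
        = some (t.set (t.length - (-a).toNat) (t[t.length - (-a).toNat] ++ [b])) := by
      simp only [PySem.List.pySet?, PySem.List.pyIdx?]
      rw [if_neg (by omega), if_pos h1]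
      simp
    unfold pvAppendAt
    rw [hget]
    dsimp only
    rw [hset, hw]
    simp [List.getD_eq_getElem?_getD, List.getElem?_eq_getElem hilt]

-- row 1 of the built table stays empty when no row index wraps to 1
theorem pvBuildTree_row1 (m : Nat) (links : List (List Int))
    (hm : 2 ≤ m)
    (h : ∀ l ∈ links, l.length = 2 ∧ -(m : Int) ≤ l.getD 0 0 ∧ l.getD 0 0 < (m : Int) ∧
      pvWrapIdx (l.getD 0 0) m ≠ 1) :
    (pvBuildTree m links).getD 1 [] = [] := by
  have aux : ∀ (ls : List (List Int)) (t : List (List Int)),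
      (∀ l ∈ ls, l.length = 2 ∧ -(m : Int) ≤ l.getD 0 0 ∧ l.getD 0 0 < (m : Int) ∧
        pvWrapIdx (l.getD 0 0) m ≠ 1) →
      t.length = m → t.getD 1 [] = [] →
      (ls.foldl (fun t l =>
        match l with
        | [a, b] => pvAppendAt t a b
        | _ => t) t).getD 1 [] = [] := by
    intro ls
    induction ls with
    | nil => intro t _ _ h1; exact h1
    | cons l rest ih =>
      intro t hls hlen h1
      obtain ⟨hl, hrest⟩ := List.forall_mem_cons.mp hls
      obtain ⟨a, b, rfl⟩ := pvList_len2 l hl.1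
      have ha1 : -(m : Int) ≤ a := by simpa using hl.2.1
      have ha2 : a < (m : Int) := by simpa using hl.2.2.1
      have hne : pvWrapIdx a m ≠ 1 := by simpa using hl.2.2.2
      have hwnn : 0 ≤ pvWrapIdx a m := by unfold pvWrapIdx; split <;> omega
      have heq := pvAppendAt_eq' t a b (by rw [hlen]; exact ha1) (by rw [hlen]; exact ha2)
      rw [hlen] at heq
      simp only [List.foldl_cons]
      refine ih _ hrest ?_ ?_
      · rw [heq]; simp [hlen]
      · rw [heq, List.getD_eq_getElem?_getD, List.getElem?_set_ne (by omega),
          ← List.getD_eq_getElem?_getD]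
        exact h1
  refine aux links _ h (by simp) ?_
  rw [List.getD_eq_getElem?_getD]
  have h1m : 1 < m := by omega
  rw [List.getElem?_map, List.getElem?_range h1m]
  simp

theorem pvBuildTree_aux (m : Nat) :
    ∀ (ls : List (List Int)) (t : List (List Int)),
      (∀ l ∈ ls, l.length = 2 ∧ 0 ≤ l.getD 0 0 ∧ l.getD 0 0 < (m : Int)) →
      t.length = m →
      ∀ j : Int, 0 ≤ j → j < (m : Int) →
      (ls.foldl (fun t l =>
          match l with
          | [a, b] => pvAppendAt t a b
          | _ => t) t).getD j.toNat []
        = t.getD j.toNat [] ++ childrenOf ls j := by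
  intro ls
  induction ls with
  | nil => intro t _ _ j _ _; simp [childrenOf]
  | cons l rest ih =>
    intro t hls hlen j hj0 hjm
    obtain ⟨hl, hrest⟩ := List.forall_mem_cons.mp hls
    obtain ⟨a, b, rfl⟩ := pvList_len2 l hl.1
    have ha0 : 0 ≤ a := by simpa using hl.2.1
    have ham : a < (m : Int) := by simpa using hl.2.2
    have heq := pvAppendAt_eq t a b ha0 (by omega)
    simp only [List.foldl_cons, heq]
    rw [ih _ hrest (by simp [hlen]) j hj0 hjm]
    rw [childrenOf_cons]
    by_cases hij : a = j
    · subst hij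
      rw [if_pos rfl, List.getD_eq_getElem?_getD, List.getElem?_set_self]
      · simp [List.append_assoc]
      · omega
    · have hne : j.toNat ≠ a.toNat := by omega
      rw [if_neg hij, List.getD_eq_getElem?_getD, List.getElem?_set_ne (by omega),
        ← List.getD_eq_getElem?_getD]

-- rows of the built table are exactly childrenOf, for any table size above the parents
theorem pvBuildTree_getD (m : Nat) (links : List (List Int))
    (hl : ∀ l ∈ links, l.length = 2 ∧ 0 ≤ l.getD 0 0 ∧ l.getD 0 0 < (m : Int))
    (j : Int) (hj0 : 0 ≤ j) (hjm : j < (m : Int)) :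
    (pvBuildTree m links).getD j.toNat [] = childrenOf links j := by
  unfold pvBuildTree
  rw [pvBuildTree_aux m links _ hl (by simp) j hj0 hjm]
  have : ((List.range m).map (fun _ => ([] : List Int))).getD j.toNat [] = [] := by
    rw [List.getD_eq_getElem?_getD]
    rcases h : ((List.range m).map (fun _ => ([] : List Int)))[j.toNat]? with _ | row
    · simp
    · have := List.mem_of_getElem? h
      simp at this
      simp [this]
  rw [this, List.nil_append]

theorem pvE_bounds {sales : List Int} {links : List (List Int)}
    (hpre : PreTree sales links) {a b : Int} (h : pvE links a b) :
    1 ≤ a ∧ a ≤ (sales.length : Int) ∧ 2 ≤ b ∧ b ≤ (sales.length : Int) := by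
  obtain ⟨-, hlinks, -⟩ := hpre
  unfold pvE childrenOf at h
  obtain ⟨l, hlf, hb⟩ := List.mem_map.mp h
  obtain ⟨hmem, heq⟩ := List.mem_filter.mp hlf
  have heq' : l.getD 0 0 = a := by simpa using heq
  obtain ⟨-, h1, h2, h3, h4⟩ := hlinks l hmem
  exact ⟨by omega, by omega, by omega, by omega⟩

theorem nodup_map_eq (f g : List Int → Int) :
    ∀ (xs : List (List Int)), (xs.map f).Nodup →
      ∀ l1 ∈ xs, ∀ l2 ∈ xs, f l1 = f l2 → g l1 = g l2 := by
  intro xs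
  induction xs with
  | nil => simp
  | cons x t ih =>
    intro hnd l1 h1 l2 h2 hf
    rw [List.map_cons, List.nodup_cons] at hnd
    rcases List.mem_cons.mp h1 with h1e | h1m
    · rcases List.mem_cons.mp h2 with h2e | h2m
      · rw [h1e, h2e]
      · subst h1e
        exact absurd (List.mem_map.mpr ⟨l2, h2m, hf.symm⟩) hnd.1
    · rcases List.mem_cons.mp h2 with h2e | h2m
      · subst h2e
        exact absurd (List.mem_map.mpr ⟨l1, h1m, hf⟩) hnd.1
      · exact ih hnd.2 l1 h1m l2 h2m hf

theorem pv_parent_unique {sales : List Int} {links : List (List Int)}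
    (hpre : PreTree sales links) {p q v : Int}
    (hp : pvE links p v) (hq : pvE links q v) : p = q := by
  obtain ⟨-, -, hnd⟩ := hpre
  unfold pvE childrenOf at hp hq
  obtain ⟨l1, hl1f, hb1⟩ := List.mem_map.mp hp
  obtain ⟨hm1, he1⟩ := List.mem_filter.mp hl1f
  obtain ⟨l2, hl2f, hb2⟩ := List.mem_map.mp hq
  obtain ⟨hm2, he2⟩ := List.mem_filter.mp hl2f
  have he1' : l1.getD 0 0 = p := by simpa using he1
  have he2' : l2.getD 0 0 = q := by simpa using he2
  have h := nodup_map_eq (fun l => l.getD 1 0) (fun l => l.getD 0 0) links hnd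
    l1 hm1 l2 hm2 (show l1.getD 1 0 = l2.getD 1 0 by rw [hb1, hb2])
  have h' : l1.getD 0 0 = l2.getD 0 0 := h
  omega

-- every non-head member of a chain has an in-edge
theorem chain_mem_tail {R : Int → Int → Prop} :
    ∀ (P : List Int) (a : Int), List.IsChain R (a :: P) →
      ∀ x ∈ P, ∃ y, R y x := by
  intro P
  induction P with
  | nil => intro a _ x hx; simp at hx
  | cons b t ih =>
    intro a h x hx
    rw [List.isChain_cons_cons] at h
    rcases List.mem_cons.mp hx with rfl | hx
    · exact ⟨a, h.1⟩
    · exact ih b h.2 x hx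

-- every node of a root chain is in [1, n]
theorem pvPath_bounds {sales : List Int} {links : List (List Int)}
    (hpre : PreTree sales links) (P : List Int)
    (hc : List.IsChain (pvE links) P) (hh : P.head? = some 1) :
    ∀ x ∈ P, 1 ≤ x ∧ x ≤ (sales.length : Int) := by
  have hn1 : 1 ≤ sales.length := by
    cases sales with
    | nil => exact absurd rfl hpre.1
    | cons a t => simp
  cases P with
  | nil => intro x hx; simp at hx
  | cons a t =>
    have ha : a = 1 := by simpa using hh
    subst ha
    intro x hx
    rcases List.mem_cons.mp hx with rfl | hx
    · constructor <;> [omega; exact_mod_cast hn1]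
    · obtain ⟨y, hy⟩ := chain_mem_tail t 1 hc x hx
      have := pvE_bounds hpre hy
      omega

-- chains starting at the root never repeat a node (each node has at most one parent,
-- the root none)
theorem pvPath_nodup {sales : List Int} {links : List (List Int)}
    (hpre : PreTree sales links) :
    ∀ (P : List Int), List.IsChain (pvE links) P → P.head? = some 1 → P.Nodup := by
  intro P
  induction P using List.reverseRecOn with
  | nil => intro _ _; simp
  | append_singleton l v ih =>
    intro hc hh
    cases l with
    | nil => simp
    | cons a t =>
      rw [List.isChain_append] at hc
      obtain ⟨hc1, -, hlast⟩ := hc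
      have hh' : (a :: t).head? = some 1 := by
        rw [List.head?_append_of_ne_nil _ (by simp)] at hh
        exact hh
      have hnd := ih hc1 hh'
      rw [List.nodup_append]
      refine ⟨hnd, by simp, ?_⟩
      intro x hx y hy hxy
      have hyv : y = v := by simpa using hy
      have hxv : x = v := by omega
      rw [hxv] at hx
      obtain ⟨u, hu, hRu⟩ : ∃ u, (a :: t).getLast? = some u ∧ pvE links u v := by
        rcases h : (a :: t).getLast? with _ | u
        · simp at h
        · exact ⟨u, rfl, hlast u (by rw [h]; rfl) v rfl⟩
      have hv2 : (2 : Int) ≤ v := (pvE_bounds hpre hRu).2.2.1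
      have ha1 : a = 1 := by simpa using hh'
      have hvne : v ≠ a := by omega
      have hvt : v ∈ t := by
        rcases List.mem_cons.mp hx with h | h
        · exact absurd h hvne
        · exact h
      obtain ⟨p, q, hpq⟩ := List.append_of_mem hvt
      have hsplit : a :: t = (a :: p) ++ v :: q := by rw [hpq]; rfl
      rw [hsplit, List.isChain_append] at hc1
      obtain ⟨hcp, -, hmid⟩ := hc1
      obtain ⟨u', hu', hRu'⟩ : ∃ u', (a :: p).getLast? = some u' ∧ pvE links u' v := by
        rcases h : (a :: p).getLast? with _ | u'
        · simp at h
        · exact ⟨u', rfl, hmid u' (by rw [h]; rfl) v rfl⟩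
      have huu : u' = u := pv_parent_unique hpre hRu' hRu
      subst huu
      have hu'mem : u' ∈ a :: p := List.mem_of_mem_getLast? (by rw [hu']; rfl)
      have humem : u' ∈ v :: q := by
        rw [hsplit, List.getLast?_append_of_ne_nil _ (by simp)] at hu
        exact List.mem_of_mem_getLast? (by rw [hu]; rfl)
      rw [hsplit, List.nodup_append] at hnd
      exact hnd.2.2 u' hu'mem u' humem rfl

theorem pvPath_length_le {sales : List Int} {links : List (List Int)}
    (hpre : PreTree sales links) (P : List Int)
    (hc : List.IsChain (pvE links) P) (hh : P.head? = some 1) :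
    P.length ≤ sales.length := by
  have hnd := pvPath_nodup hpre P hc hh
  have hb := pvPath_bounds hpre P hc hh
  have hsub : P.toFinset ⊆ Finset.Icc (1 : Int) (sales.length : Int) := by
    intro x hx
    have := hb x (List.mem_toFinset.mp hx)
    simp only [Finset.mem_Icc]; omega
  calc P.length = P.toFinset.card := (List.toFinset_card_of_nodup hnd).symm
    _ ≤ (Finset.Icc (1 : Int) (sales.length : Int)).card := Finset.card_le_card hsub
    _ = sales.length := by rw [Int.card_Icc]; omega

-- reachability gives a chain list
theorem reach_chain {links : List (List Int)} {a b : Int}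
    (h : Relation.ReflTransGen (pvE links) a b) :
    ∃ M : List Int, M.head? = some a ∧ M.getLast? = some b ∧ List.IsChain (pvE links) M := by
  induction h with
  | refl => exact ⟨[a], rfl, rfl, List.isChain_singleton a⟩
  | @tail b c hab hbc ih =>
    obtain ⟨M, hh, hl, hc⟩ := ih
    refine ⟨M ++ [c], ?_, by simp, ?_⟩
    · cases M with
      | nil => simp at hh
      | cons m t => simpa using hh
    · refine List.isChain_append.2 ⟨hc, List.isChain_singleton c, ?_⟩
      intro x hx y hy
      have hx' : b = x := by rw [hl] at hx; simpa using hx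
      have hy' : c = y := by simpa using hy
      rw [← hx', ← hy']; exact hbc

-- a child of the end of a root chain cannot reach back into the chain's end
theorem pv_no_cycle {sales : List Int} {links : List (List Int)}
    (hpre : PreTree sales links) (P : List Int) (v c : Int)
    (hc : List.IsChain (pvE links) P) (hh : P.head? = some 1) (hl : P.getLast? = some v)
    (hvc : pvE links v c) :
    ¬ Relation.ReflTransGen (pvE links) c v := by
  intro hreach
  obtain ⟨M, hMh, hMl, hMc⟩ := reach_chain hreach
  have hPne : P ≠ [] := by intro h; rw [h] at hl; simp at hl
  have hcPM : List.IsChain (pvE links) (P ++ M) := by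
    refine List.isChain_append.2 ⟨hc, hMc, ?_⟩
    intro x hx y hy
    have hx' : v = x := by rw [hl] at hx; simpa using hx
    have hy' : c = y := by rw [hMh] at hy; simpa using hy
    rw [← hx', ← hy']; exact hvc
  have hhPM : (P ++ M).head? = some 1 := by
    rw [List.head?_append_of_ne_nil _ hPne]; exact hh
  have hnd := pvPath_nodup hpre (P ++ M) hcPM hhPM
  rw [List.nodup_append] at hnd
  exact hnd.2.2 v (List.mem_of_mem_getLast? (by rw [hl]; rfl)) v
    (List.mem_of_mem_getLast? (by rw [hMl]; rfl)) rfl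

theorem foldl_min_congr (f g : Int → Int) :
    ∀ (l : List Int) (i1 i2 : Int), i1 = i2 → (∀ x ∈ l, f x = g x) →
      l.foldl (fun m j => min m (f j)) i1 = l.foldl (fun m j => min m (g j)) i2 := by
  intro l
  induction l with
  | nil => intro i1 i2 h _; simpa using h
  | cons x xs ih =>
    intro i1 i2 h hall
    simp only [List.foldl_cons]
    exact ih _ _ (by rw [h, hall x (by simp)]) (fun y hy => hall y (by simp [hy]))

-- pvF is stable in the fuel once the fuel exceeds the subtree height
theorem pvF_stable (links : List (List Int)) (s : List Int) :
    ∀ (k : Nat) (v : Int), pvLow links k v → ∀ (f1 f2 : Nat), k ≤ f1 → k ≤ f2 →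
      pvF links s f1 v = pvF links s f2 v := by
  intro k
  induction k with
  | zero => intro v hlow; exact absurd hlow (by simp [pvLow])
  | succ k ih =>
    intro v hlow f1 f2 h1 h2
    obtain ⟨a, rfl⟩ : ∃ a, f1 = a + 1 := ⟨f1 - 1, by omega⟩
    obtain ⟨b, rfl⟩ : ∃ b, f2 = b + 1 := ⟨f2 - 1, by omega⟩
    rw [pvF, pvF]
    cases hch : childrenOf links v with
    | nil => rfl
    | cons c cs =>
      have hlow' : ∀ x ∈ c :: cs, pvLow links k x := by
        rw [pvLow] at hlow; rw [← hch]; exact hlow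
      have heq : ∀ x ∈ c :: cs, pvF links s a x = pvF links s b x :=
        fun x hx => ih x (hlow' x hx) a b (by omega) (by omega)
      have hmap : List.map (fun j => min (pvF links s a j).1 (pvF links s a j).2) (c :: cs)
          = List.map (fun j => min (pvF links s b j).1 (pvF links s b j).2) (c :: cs) :=
        List.map_congr_left (fun x hx => by rw [heq x hx])
      have hfold := foldl_min_congr (fun j => (pvF links s a j).1 - (pvF links s a j).2)
        (fun j => (pvF links s b j).1 - (pvF links s b j).2) cs
        ((pvF links s a c).1 - (pvF links s a c).2)
        ((pvF links s b c).1 - (pvF links s b c).2)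
        (by show (pvF links s a c).1 - (pvF links s a c).2
              = (pvF links s b c).1 - (pvF links s b c).2
            rw [heq c (by simp)])
        (fun x hx => by
          show (pvF links s a x).1 - (pvF links s a x).2
            = (pvF links s b x).1 - (pvF links s b x).2
          rw [heq x (by simp [hx])])
      simp only [hmap, hfold]

-- every node reachable by a root chain has height below the remaining room
theorem pvLow_of_path {sales : List Int} {links : List (List Int)}
    (hpre : PreTree sales links) :
    ∀ (k : Nat) (P : List Int) (v : Int), List.IsChain (pvE links) P →
      P.head? = some 1 → P.getLast? = some v →
      sales.length + 1 = P.length + k → pvLow links k v := by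
  intro k
  induction k with
  | zero =>
    intro P v hc hh hl hlen
    have := pvPath_length_le hpre P hc hh
    omega
  | succ k ih =>
    intro P v hc hh hl hlen
    rw [pvLow]
    intro c hcmem
    have hvc : pvE links v c := hcmem
    have hPne : P ≠ [] := by intro h; rw [h] at hl; simp at hl
    refine ih (P ++ [c]) c ?_ ?_ (by simp) (by simp; omega)
    · refine List.isChain_append.2 ⟨hc, List.isChain_singleton c, ?_⟩
      intro x hx y hy
      have hx' : v = x := by rw [hl] at hx; simpa using hx
      have hy' : c = y := by simpa using hy
      rw [← hx', ← hy']; exact hvc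
    · rw [List.head?_append_of_ne_nil _ hPne]; exact hh

-- one iteration of A's child loop, named
def pvStepA (tree : List (List Int)) (s : List Int) (f : Nat) (node : Int) :
    List (Int × Int) × Option Int → Int → List (Int × Int) × Option Int :=
  fun st i =>
    let dp2 := pvDfsA tree s f i st.1
    let di := PySem.List.pyGetD dp2 i (0, 0)
    let cur := PySem.List.pyGetD dp2 node (0, 0)
    let dp3 := PySem.List.pySetD dp2 node (cur.1 + min di.1 di.2, cur.2)
    let mg := match st.2 with
      | none => di.1 - di.2
      | some m => min m (di.1 - di.2)
    (dp3, some (if mg < 0 then 0 else mg))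

theorem pvDfsA_succ (tree : List (List Int)) (s : List Int) (f : Nat) (node : Int)
    (dp : List (Int × Int)) :
    pvDfsA tree s (f + 1) node dp =
      (let ch := PySem.List.pyGetD tree node []
       if ch = [] then
         PySem.List.pySetD dp node (PySem.List.pyGetD s node 0, 0)
       else
         let sv := PySem.List.pyGetD s node 0
         let dp1 := PySem.List.pySetD dp node (sv, (PySem.List.pyGetD dp node (0, 0)).2)
         let st := ch.foldl (pvStepA tree s f node) (dp1, none)
         let cur := PySem.List.pyGetD st.1 node (0, 0)
         PySem.List.pySetD st.1 node (cur.1, cur.1 + st.2.getD 0 - sv)) := rfl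

def pvOptStepG (g : Int → Int) : Option Int → Int → Option Int :=
  fun mo x => some (max 0 (match mo with
    | none => g x
    | some m => min m (g x)))

theorem clamp_eq_max (a : Int) : (if a < 0 then 0 else a) = max 0 a := by omega

theorem pvOptStepG_clamp (g : Int → Int) :
    ∀ (l : List Int) (c0 : Int),
      l.foldl (pvOptStepG g) (some (max 0 c0))
        = some (max 0 (l.foldl (fun m x => min m (g x)) c0)) := by
  intro l
  induction l with
  | nil => intro c0; rfl
  | cons x xs ih =>
    intro c0
    simp only [List.foldl_cons]
    have h1 : pvOptStepG g (some (max 0 c0)) x = some (max 0 (min c0 (g x))) := by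
      unfold pvOptStepG; dsimp only; congr 1; omega
    rw [h1, ih]

-- the folded child loop of A's dfs: accumulates the sum at node, threads the clamped
-- running minimum, and only touches positions reachable from node
theorem pvDfsA_fold {sales : List Int} {links : List (List Int)}
    (hpre : PreTree sales links)
    (tree : List (List Int)) (s : List Int)
    (f : Nat)
    (IH : ∀ (P : List Int) (vv : Int) (dp : List (Int × Int)),
      List.IsChain (pvE links) P → P.head? = some 1 → P.getLast? = some vv →
      sales.length + 2 ≤ P.length + f → dp.length = sales.length + 2 →
      (pvDfsA tree s f vv dp).length = sales.length + 2 ∧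
      (∀ j : Nat, ¬ Relation.ReflTransGen (pvE links) vv (j : Int) →
        (pvDfsA tree s f vv dp).getD j (0, 0) = dp.getD j (0, 0)) ∧
      (pvDfsA tree s f vv dp).getD vv.toNat (0, 0) = pvF links s f vv)
    (P : List Int) (node : Int)
    (hc : List.IsChain (pvE links) P) (hh : P.head? = some 1)
    (hl : P.getLast? = some node)
    (hflen : sales.length + 2 ≤ P.length + (f + 1)) :
    ∀ (rest : List Int), (∀ x ∈ rest, pvE links node x) →
    ∀ (dpk : List (Int × Int)) (mgo : Option Int), dpk.length = sales.length + 2 →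
      ((rest.foldl (pvStepA tree s f node) (dpk, mgo)).1.length = sales.length + 2) ∧
      (∀ j : Nat, ¬ Relation.ReflTransGen (pvE links) node (j : Int) →
        (rest.foldl (pvStepA tree s f node) (dpk, mgo)).1.getD j (0, 0)
          = dpk.getD j (0, 0)) ∧
      (((rest.foldl (pvStepA tree s f node) (dpk, mgo)).1.getD node.toNat (0, 0)).1
        = (dpk.getD node.toNat (0, 0)).1
          + (rest.map (fun x => min (pvF links s f x).1 (pvF links s f x).2)).sum) ∧
      (((rest.foldl (pvStepA tree s f node) (dpk, mgo)).1.getD node.toNat (0, 0)).2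
        = (dpk.getD node.toNat (0, 0)).2) ∧
      ((rest.foldl (pvStepA tree s f node) (dpk, mgo)).2
        = rest.foldl (pvOptStepG (fun x => (pvF links s f x).1 - (pvF links s f x).2)) mgo) := by
  have hnode_mem : node ∈ P := List.mem_of_mem_getLast? (by rw [hl]; rfl)
  have hnode_b := pvPath_bounds hpre P hc hh node hnode_mem
  intro rest
  induction rest with
  | nil =>
    intro _ dpk mgo hlenk
    exact ⟨hlenk, fun j _ => rfl, by simp, rfl, rfl⟩
  | cons x xs ih =>
    intro hmemb dpk mgo hlenk
    have hx : pvE links node x := hmemb x (by simp)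
    have hxb := pvE_bounds hpre hx
    have hPx : List.IsChain (pvE links) (P ++ [x]) := by
      refine List.isChain_append.2 ⟨hc, List.isChain_singleton x, ?_⟩
      intro a ha y hy
      have ha' : node = a := by rw [hl] at ha; simpa using ha
      have hy' : x = y := by simpa using hy
      rw [← ha', ← hy']; exact hx
    have hPne : P ≠ [] := by intro h; rw [h] at hl; simp at hl
    have hIH := IH (P ++ [x]) x dpk hPx
      (by rw [List.head?_append_of_ne_nil _ hPne]; exact hh) (by simp)
      (by simp; omega) hlenk
    have hnoreach : ¬ Relation.ReflTransGen (pvE links) x node :=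
      pv_no_cycle hpre P node x hc hh hl hx
    have hnodelt : node.toNat < (pvDfsA tree s f x dpk).length := by
      rw [hIH.1]; omega
    have hcur : PySem.List.pyGetD (pvDfsA tree s f x dpk) node (0, 0)
        = dpk.getD node.toNat (0, 0) := by
      rw [pyGetD_nonneg _ _ _ (by omega)]
      exact hIH.2.1 node.toNat (by
        have : ((node.toNat : Nat) : Int) = node := by omega
        rw [this]; exact hnoreach)
    have hdi : PySem.List.pyGetD (pvDfsA tree s f x dpk) x (0, 0)
        = pvF links s f x := by
      rw [pyGetD_nonneg _ _ _ (by omega)]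
      exact hIH.2.2
    have hPfst : (pvStepA tree s f node (dpk, mgo) x).1
        = (pvDfsA tree s f x dpk).set node.toNat
            ((dpk.getD node.toNat (0, 0)).1 + min (pvF links s f x).1 (pvF links s f x).2,
             (dpk.getD node.toNat (0, 0)).2) := by
      show (PySem.List.pySetD (pvDfsA tree s f x dpk) node _) = _
      rw [PySem.List.pySetD_of_nonneg (h := by omega)]
      rw [hcur, hdi]
    have hPsnd : (pvStepA tree s f node (dpk, mgo) x).2
        = pvOptStepG (fun y => (pvF links s f y).1 - (pvF links s f y).2) mgo x := by
      show some _ = _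
      rw [hdi]
      cases mgo with
      | none => unfold pvOptStepG; dsimp only; rw [clamp_eq_max]
      | some m => unfold pvOptStepG; dsimp only; rw [clamp_eq_max]
    have hPlen : (pvStepA tree s f node (dpk, mgo) x).1.length = sales.length + 2 := by
      rw [hPfst]; simp [hIH.1]
    have hstate : pvStepA tree s f node (dpk, mgo) x
        = ((pvStepA tree s f node (dpk, mgo) x).1, (pvStepA tree s f node (dpk, mgo) x).2) := rfl
    have hxs := ih (fun y hy => hmemb y (by simp [hy]))
      (pvStepA tree s f node (dpk, mgo) x).1 (pvStepA tree s f node (dpk, mgo) x).2 hPlen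
    simp only [List.foldl_cons]
    rw [hstate]
    refine ⟨hxs.1, ?_, ?_, ?_, ?_⟩
    · intro j hj
      have hjne : j ≠ node.toNat := by
        intro h
        subst h
        apply hj
        have : ((node.toNat : Nat) : Int) = node := by omega
        rw [this]
      have hjx : ¬ Relation.ReflTransGen (pvE links) x (j : Int) := by
        intro h
        exact hj (Relation.ReflTransGen.head hx h)
      rw [hxs.2.1 j hj, hPfst, List.getD_eq_getElem?_getD,
        List.getElem?_set_ne (by omega), ← List.getD_eq_getElem?_getD]
      exact hIH.2.1 j hjx
    · rw [hxs.2.2.1, hPfst, List.getD_eq_getElem?_getD]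
      simp only [List.getElem?_set_self, hnodelt, Option.getD_some]
      simp only [List.map_cons, List.sum_cons]
      omega
    · rw [hxs.2.2.2.1, hPfst, List.getD_eq_getElem?_getD]
      simp only [List.getElem?_set_self, hnodelt, Option.getD_some]
    · rw [hxs.2.2.2.2, hPsnd]

-- A's dfs computes pvF at its node, touching only positions reachable from it
theorem pvDfsA_spec {sales : List Int} {links : List (List Int)}
    (hpre : PreTree sales links)
    (tree : List (List Int)) (s : List Int)
    (hrow : ∀ v : Int, 1 ≤ v → v ≤ (sales.length : Int) →
      PySem.List.pyGetD tree v [] = childrenOf links v) :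
    ∀ (fuel : Nat) (P : List Int) (vv : Int) (dp : List (Int × Int)),
      List.IsChain (pvE links) P → P.head? = some 1 → P.getLast? = some vv →
      sales.length + 2 ≤ P.length + fuel → dp.length = sales.length + 2 →
      (pvDfsA tree s fuel vv dp).length = sales.length + 2 ∧
      (∀ j : Nat, ¬ Relation.ReflTransGen (pvE links) vv (j : Int) →
        (pvDfsA tree s fuel vv dp).getD j (0, 0) = dp.getD j (0, 0)) ∧
      (pvDfsA tree s fuel vv dp).getD vv.toNat (0, 0) = pvF links s fuel vv := by
  intro fuel
  induction fuel with
  | zero =>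
    intro P vv dp hc hh hl hflen hlen
    have := pvPath_length_le hpre P hc hh
    omega
  | succ f ihf =>
    intro P vv dp hc hh hl hflen hlen
    have hvv_mem : vv ∈ P := List.mem_of_mem_getLast? (by rw [hl]; rfl)
    have hvb := pvPath_bounds hpre P hc hh vv hvv_mem
    have h0n : (0 : Int) ≤ vv := by omega
    have hnlt : vv.toNat < dp.length := by rw [hlen]; omega
    rw [pvDfsA_succ]
    dsimp only
    rw [hrow vv hvb.1 hvb.2]
    cases hch : childrenOf links vv with
    | nil =>
      rw [if_pos rfl, PySem.List.pySetD_of_nonneg (h := h0n)]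
      refine ⟨by simp [hlen], ?_, ?_⟩
      · intro j hj
        have hjne : j ≠ vv.toNat := by
          intro h; subst h; apply hj
          have : ((vv.toNat : Nat) : Int) = vv := by omega
          rw [this]
        rw [List.getD_eq_getElem?_getD, List.getElem?_set_ne (by omega),
          ← List.getD_eq_getElem?_getD]
      · rw [List.getD_eq_getElem?_getD]
        simp only [List.getElem?_set_self, hnlt, Option.getD_some]
        rw [pvF, hch]
    | cons c cs =>
      have hmem : ∀ x ∈ c :: cs, pvE links vv x := by
        intro x hxm
        show x ∈ childrenOf links vv
        rw [hch]; exact hxm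
      rw [if_neg (List.cons_ne_nil c cs)]
      simp only [PySem.List.pySetD_of_nonneg (h := h0n)]
      set dp1 := dp.set vv.toNat
        (PySem.List.pyGetD s vv 0, (PySem.List.pyGetD dp vv (0, 0)).2) with hdp1
      have hlen1 : dp1.length = sales.length + 2 := by rw [hdp1]; simp [hlen]
      obtain ⟨hL, hU, hN1, hN2, hS⟩ := pvDfsA_fold hpre tree s f
        (fun P' vv' dp' a b cg d e => ihf P' vv' dp' a b cg d e)
        P vv hc hh hl hflen (c :: cs) hmem dp1 none hlen1
      set st := (c :: cs).foldl (pvStepA tree s f vv) (dp1, none) with hst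
      have hdp1n : dp1.getD vv.toNat (0, 0)
          = (PySem.List.pyGetD s vv 0, (PySem.List.pyGetD dp vv (0, 0)).2) := by
        rw [hdp1, List.getD_eq_getElem?_getD]
        simp only [List.getElem?_set_self, hnlt, Option.getD_some]
      have hstlt : vv.toNat < st.1.length := by rw [hL]; omega
      have hcurval : PySem.List.pyGetD st.1 vv (0, 0)
          = (PySem.List.pyGetD s vv 0
              + ((c :: cs).map (fun x => min (pvF links s f x).1 (pvF links s f x).2)).sum,
             (PySem.List.pyGetD dp vv (0, 0)).2) := by
        rw [pyGetD_nonneg _ _ _ h0n]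
        refine Prod.ext ?_ ?_
        · rw [hN1, hdp1n]
        · rw [hN2, hdp1n]
      have hsnd : st.2.getD 0
          = max 0 (cs.foldl
              (fun m j => min m ((pvF links s f j).1 - (pvF links s f j).2))
              ((pvF links s f c).1 - (pvF links s f c).2)) := by
        rw [hS, List.foldl_cons,
          show pvOptStepG (fun y => (pvF links s f y).1 - (pvF links s f y).2) none c
            = some (max 0 ((pvF links s f c).1 - (pvF links s f c).2)) from rfl,
          pvOptStepG_clamp]
        rfl
      refine ⟨by rw [List.length_set]; exact hL, ?_, ?_⟩
      · intro j hj
        have hjne : j ≠ vv.toNat := by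
          intro h; subst h; apply hj
          have : ((vv.toNat : Nat) : Int) = vv := by omega
          rw [this]
        rw [List.getD_eq_getElem?_getD, List.getElem?_set_ne (by omega),
          ← List.getD_eq_getElem?_getD, hU j hj, hdp1, List.getD_eq_getElem?_getD,
          List.getElem?_set_ne (by omega), ← List.getD_eq_getElem?_getD]
      · rw [List.getD_eq_getElem?_getD]
        simp only [List.getElem?_set_self, hstlt, Option.getD_some]
        rw [hcurval]
        dsimp only
        rw [hsnd, pvF, hch]

-- one synchronous round of B preserves correctness one height level up
theorem pvPassB {sales : List Int} {links : List (List Int)}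
    (hpre : PreTree sales links)
    (children : List (List Int)) (s : List Int)
    (hrow : ∀ v : Int, 1 ≤ v → v ≤ (sales.length : Int) →
      PySem.List.pyGetD children v [] = childrenOf links v)
    (k : Nat) (hk : k ≤ sales.length)
    (dp : List (Int × Int))
    (hgood : ∀ v : Int, 1 ≤ v → v ≤ (sales.length : Int) → pvLow links k v →
      PySem.List.pyGetD dp v (0, 0) = pvF links s (sales.length + 2) v) :
    ∀ v : Int, 1 ≤ v → v ≤ (sales.length : Int) → pvLow links (k + 1) v →
      PySem.List.pyGetD
        ((PySem.List.pyRange 0 ((sales.length : Int) + 1) 1).map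
          (fun u => pvStepBv (PySem.List.pyGetD children u []) s dp u)) v (0, 0)
        = pvF links s (sales.length + 2) v := by
  intro v h1 h2 hlow
  rw [PySem.List.pyGetD_map_pyRange_of_nonneg _ _ _ _ (by omega) (by omega)]
  rw [hrow v h1 h2]
  have hF : pvF links s (sales.length + 2) v = pvF links s (sales.length + 1 + 1) v := rfl
  rw [hF, pvF]
  cases hch : childrenOf links v with
  | nil => rfl
  | cons c cs =>
    unfold pvStepBv
    dsimp only
    have hlow' : ∀ x ∈ c :: cs, pvLow links k x := by
      rw [pvLow] at hlow; rw [← hch]; exact hlow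
    have hmem : ∀ x ∈ c :: cs, pvE links v x := by
      intro x hxm; show x ∈ childrenOf links v; rw [hch]; exact hxm
    have hchild : ∀ x ∈ c :: cs,
        PySem.List.pyGetD dp x (0, 0) = pvF links s (sales.length + 1) x := by
      intro x hxm
      have hxb := pvE_bounds hpre (hmem x hxm)
      rw [hgood x (by omega) (by omega) (hlow' x hxm)]
      exact pvF_stable links s k x (hlow' x hxm) _ _ (by omega) (by omega)
    have hmap : List.map (fun j =>
          min (PySem.List.pyGetD dp j ((0 : Int), (0 : Int))).1
              (PySem.List.pyGetD dp j ((0 : Int), (0 : Int))).2) (c :: cs)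
        = List.map (fun x => min (pvF links s (sales.length + 1) x).1
              (pvF links s (sales.length + 1) x).2) (c :: cs) :=
      List.map_congr_left (fun x hxm => by rw [hchild x hxm])
    have hfold := foldl_min_congr
      (fun j => (PySem.List.pyGetD dp j ((0 : Int), (0 : Int))).1
          - (PySem.List.pyGetD dp j ((0 : Int), (0 : Int))).2)
      (fun j => (pvF links s (sales.length + 1) j).1 - (pvF links s (sales.length + 1) j).2)
      cs
      ((PySem.List.pyGetD dp c ((0 : Int), (0 : Int))).1
        - (PySem.List.pyGetD dp c ((0 : Int), (0 : Int))).2)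
      ((pvF links s (sales.length + 1) c).1 - (pvF links s (sales.length + 1) c).2)
      (by show (PySem.List.pyGetD dp c ((0 : Int), (0 : Int))).1
              - (PySem.List.pyGetD dp c ((0 : Int), (0 : Int))).2 = _
          rw [hchild c (by simp)])
      (fun x hxm => by
        show (PySem.List.pyGetD dp x ((0 : Int), (0 : Int))).1
            - (PySem.List.pyGetD dp x ((0 : Int), (0 : Int))).2 = _
        rw [hchild x (by simp [hxm])])
    simp only [hmap, hfold]

-- after k rounds, every node of height below k is correct, and the table keeps its length
theorem pvItersB {sales : List Int} {links : List (List Int)}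
    (hpre : PreTree sales links)
    (children : List (List Int)) (s : List Int)
    (hrow : ∀ v : Int, 1 ≤ v → v ≤ (sales.length : Int) →
      PySem.List.pyGetD children v [] = childrenOf links v) :
    ∀ (k : Nat), k ≤ sales.length →
      ((List.range k).foldl
        (fun dp _ => (PySem.List.pyRange 0 ((sales.length : Int) + 1) 1).map
          (fun u => pvStepBv (PySem.List.pyGetD children u []) s dp u))
        (List.replicate (sales.length + 1) ((0 : Int), (0 : Int)))).length
          = sales.length + 1 ∧
      ∀ v : Int, 1 ≤ v → v ≤ (sales.length : Int) → pvLow links k v →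
        PySem.List.pyGetD
          ((List.range k).foldl
            (fun dp _ => (PySem.List.pyRange 0 ((sales.length : Int) + 1) 1).map
              (fun u => pvStepBv (PySem.List.pyGetD children u []) s dp u))
            (List.replicate (sales.length + 1) ((0 : Int), (0 : Int)))) v (0, 0)
          = pvF links s (sales.length + 2) v := by
  intro k
  induction k with
  | zero =>
    intro _
    refine ⟨by simp, ?_⟩
    intro v _ _ hlow
    exact absurd hlow (by simp [pvLow])
  | succ k ih =>
    intro hk
    obtain ⟨hlen, hgood⟩ := ih (by omega)
    rw [List.range_succ, List.foldl_append, List.foldl_cons, List.foldl_nil]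
    constructor
    · rw [List.length_map, PySem.List.length_pyRange_one]
      omega
    · exact pvPassB hpre children s hrow k (by omega) _ hgood

-- ===== VERDICT =====
theorem solution_spec : Claim_equal_solution := by
  intro sales links _ hpre
  have hn1 : 1 ≤ sales.length := by
    rcases hpre with ⟨hne, -⟩ | ⟨hne, -⟩ <;>
      (cases sales with
       | nil => exact absurd rfl hne
       | cons a t => simp)
  unfold Spec_solution solution solution_alt
  dsimp only
  rw [show (0 :: sales).length + 1 = sales.length + 2 from by simp]
  set n := sales.length with hn
  set s := (0 : Int) :: sales with hs
  rcases hpre with hpre | hpre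
  · -- tree-shaped links: both programs compute pvF at the root
    have hlinksA : ∀ l ∈ links, l.length = 2 ∧ 0 ≤ l.getD 0 0 ∧
        l.getD 0 0 < ((n + 2 : Nat) : Int) := by
      intro l hl
      obtain ⟨hl2, ha1, ha2, -, -⟩ := hpre.2.1 l hl
      refine ⟨hl2, by omega, by push_cast; omega⟩
    have hlinksB : ∀ l ∈ links, l.length = 2 ∧ 0 ≤ l.getD 0 0 ∧
        l.getD 0 0 < ((n + 1 : Nat) : Int) := by
      intro l hl
      obtain ⟨hl2, ha1, ha2, -, -⟩ := hpre.2.1 l hl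
      refine ⟨hl2, by omega, by push_cast; omega⟩
    have hrowA : ∀ v : Int, 1 ≤ v → v ≤ (n : Int) →
        PySem.List.pyGetD (pvBuildTree (n + 2) links) v [] = childrenOf links v := by
      intro v h1 h2
      rw [pyGetD_nonneg _ _ _ (by omega)]
      exact pvBuildTree_getD (n + 2) links hlinksA v (by omega) (by push_cast; omega)
    have hrowB : ∀ v : Int, 1 ≤ v → v ≤ (n : Int) →
        PySem.List.pyGetD (pvBuildTree (n + 1) links) v [] = childrenOf links v := by
      intro v h1 h2
      rw [pyGetD_nonneg _ _ _ (by omega)]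
      exact pvBuildTree_getD (n + 1) links hlinksB v (by omega) (by push_cast; omega)
    have hA := pvDfsA_spec hpre (pvBuildTree (n + 2) links) s hrowA (n + 2) [1] 1
      ((List.range (n + 2)).map (fun _ => ((0 : Int), (0 : Int))))
      (List.isChain_singleton 1) rfl rfl (by simp; omega) (by simp; omega)
    have hAv : PySem.List.pyGetD
        (pvDfsA (pvBuildTree (n + 2) links) s (n + 2) 1
          ((List.range (n + 2)).map (fun _ => ((0 : Int), (0 : Int))))) 1 (0, 0)
        = pvF links s (n + 2) 1 := by
      rw [pyGetD_nonneg _ _ _ (by norm_num)]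
      exact hA.2.2
    have hB := pvItersB hpre (pvBuildTree (n + 1) links) s hrowB n le_rfl
    have hlow1 : pvLow links n 1 :=
      pvLow_of_path hpre n [1] 1 (List.isChain_singleton 1) rfl rfl (by simp; omega)
    have hBv := hB.2 1 (by omega) (by exact_mod_cast hn1) hlow1
    rw [hAv, hBv]
  · -- node 1 is a leaf in both tables: both programs return min(sales[0], 0)
    have hrow1A : PySem.List.pyGetD (pvBuildTree (n + 2) links) 1 [] = [] := by
      rw [pyGetD_nonneg _ _ _ (by norm_num)]
      refine pvBuildTree_row1 (n + 2) links (by omega) ?_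
      intro l hl
      obtain ⟨hl2, ha1, ha2, hw2, -, -, -⟩ := hpre.2 l hl
      refine ⟨hl2, by push_cast; omega, by push_cast; omega, ?_⟩
      unfold pvWrapIdx
      split <;> rename_i hcond
      · rw [if_pos hcond] at hw2; push_cast; omega
      · rw [if_neg hcond] at hw2; omega
    have hrow1B : PySem.List.pyGetD (pvBuildTree (n + 1) links) 1 [] = [] := by
      rw [pyGetD_nonneg _ _ _ (by norm_num)]
      refine pvBuildTree_row1 (n + 1) links (by omega) ?_
      intro l hl
      obtain ⟨hl2, ha1, ha2, -, hw1, -, -⟩ := hpre.2 l hl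
      refine ⟨hl2, by push_cast; omega, by push_cast; omega, ?_⟩
      unfold pvWrapIdx
      split <;> rename_i hcond
      · rw [if_pos hcond] at hw1; push_cast; omega
      · rw [if_neg hcond] at hw1; omega
    have hAval : PySem.List.pyGetD
        (pvDfsA (pvBuildTree (n + 2) links) s (n + 2) 1
          ((List.range (n + 2)).map (fun _ => ((0 : Int), (0 : Int))))) 1 (0, 0)
        = (PySem.List.pyGetD s 1 0, 0) := by
      rw [pvDfsA_succ]
      dsimp only
      rw [hrow1A, if_pos rfl, PySem.List.pySetD_of_nonneg (h := by norm_num),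
        pyGetD_nonneg _ _ _ (by norm_num), List.getD_eq_getElem?_getD]
      have hlt : (1 : Int).toNat < ((List.range (n + 2)).map
          (fun _ => ((0 : Int), (0 : Int)))).length := by
        simp
      simp only [List.getElem?_set_self, hlt, Option.getD_some]
    obtain ⟨m, hm⟩ : ∃ m, n = m + 1 := ⟨n - 1, by omega⟩
    have hBval : PySem.List.pyGetD
        ((List.range n).foldl
          (fun dp _ => (PySem.List.pyRange 0 ((n : Int) + 1) 1).map
            (fun v => pvStepBv (PySem.List.pyGetD (pvBuildTree (n + 1) links) v []) s dp v))
          (List.replicate (n + 1) ((0 : Int), (0 : Int)))) 1 (0, 0)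
        = (PySem.List.pyGetD s 1 0, 0) := by
      have hrow1B' := hrow1B
      rw [hm] at hrow1B'
      rw [hm, List.range_succ, List.foldl_append, List.foldl_cons, List.foldl_nil]
      rw [PySem.List.pyGetD_map_pyRange_of_nonneg _ _ _ _ (by norm_num) (by push_cast; omega)]
      rw [hrow1B']
      rfl
    rw [hAval, hBval]
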